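-- pv_equiv track=rewrite | github.com/fa7271/Python-Algorithm | bs/Elice/day10.py | can_find_subset
-- ===== SOURCE A (Python) =====
-- def can_find_subset(A, K):
--     from collections import defaultdict
--
--     if K > len(A):
--         return False
--
--     count = defaultdict(int)
--     required_cards = set(range(1, K + 1))
--     found_cards = set()
--
--     l = 0
--     for r in range(len(A)):
--         if 1 <= A[r] <= K:
--             count[A[r]] += 1
--             found_cards.add(A[r])
--
--         if r - l + 1 > K:
--             if 1 <= A[l] <= K:
--                 count[A[l]] -= 1
--                 if count[A[l]] == 0:
--                     found_cards.remove(A[l])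
--             l += 1
--
--         if r - l + 1 == K and found_cards == required_cards:
--             return True
--
--     return False
-- ===== SOURCE B (Python) =====
-- def can_find_subset(A, K):
--     # A size-K window equals {1..K} iff its K elements are pairwise distinct and
--     # all lie in 1..K.  Track the smallest L such that A[L..r] is duplicate-free
--     # and in range, using a last-occurrence table; succeed when that suffix has
--     # length >= K.
--     n = len(A)
--     if K < 0 or K > n:
--         return False
--     last = [-1] * (K + 1)
--     L = 0
--     for r, v in enumerate(A):
--         if 1 <= v <= K:
--             if last[v] >= L:
--                 L = last[v] + 1
--             last[v] = r
--         else: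
--             L = r + 1
--         if r - L + 1 >= K:
--             return True
--     return False
-- ===== Notes on version B (the rewrite author's own statement) =====
-- stated objective: faster
-- what changed: Replaces A's fixed-size sliding window of per-value counts with found-set/required-set equality comparison by a different algorithm: B keeps a last-occurrence table and the smallest start L of a duplicate-free in-range suffix A[L..r] (longest-substring-without-repeats technique), succeeding when that suffix reaches length K; correct because a size-K window equals {1..K} iff its elements are distinct and in 1..K.
import Mathlib
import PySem

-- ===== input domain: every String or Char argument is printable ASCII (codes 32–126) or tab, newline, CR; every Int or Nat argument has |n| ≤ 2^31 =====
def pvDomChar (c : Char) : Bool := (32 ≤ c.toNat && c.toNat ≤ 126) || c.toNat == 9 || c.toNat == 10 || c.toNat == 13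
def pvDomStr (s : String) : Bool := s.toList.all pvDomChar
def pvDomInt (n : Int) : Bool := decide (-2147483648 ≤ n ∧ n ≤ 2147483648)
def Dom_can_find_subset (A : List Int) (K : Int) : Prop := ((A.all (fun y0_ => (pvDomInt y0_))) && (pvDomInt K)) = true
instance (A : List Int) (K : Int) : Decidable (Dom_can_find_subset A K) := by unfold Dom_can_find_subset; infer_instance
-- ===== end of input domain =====

-- B keeps a last-occurrence table and the smallest start of a duplicate-free in-range
-- suffix (longest-substring-without-repeats technique) instead of A's count-dict +
-- found-set/required-set sliding window: a different algorithm with O(1) work per step.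


-- ===== PORT A =====
-- A's `for r in range(len(A))` loop with early return, state (count, found_cards, l);
-- recursion on the index r.  Python's A[l] has 0 ≤ l ≤ r < len(A) throughout, so the index is
-- always in range; found_cards.remove(x) is only reached with x present (its count was ≥ 1),
-- so Python's set.remove never raises and is ported as discard.
def canFindA_loop (A : List Int) (K : Int) (required : PySem.Set Int)
    (count : PySem.Dict Int Int) (found : PySem.Set Int) (l : Int) (r : Nat) : Bool :=
  if hr : r < A.length then
    let ar := A[r]
    let s1 := if 1 ≤ ar ∧ ar ≤ K then
        (count.insert ar (count.getD ar 0 + 1), found.add ar)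
      else (count, found)
    let s2 := if (r : Int) - l + 1 > K then
        let al := PySem.List.pyGetD A l 0
        if 1 ≤ al ∧ al ≤ K then
          let c := s1.1.getD al 0 - 1
          (s1.1.insert al c, (if c = 0 then PySem.Set.discard s1.2 al else s1.2), l + 1)
        else (s1.1, s1.2, l + 1)
      else (s1.1, s1.2, l)
    if ((r : Int) - s2.2.2 + 1 = K) ∧ PySem.Set.equal s2.2.1 required = true then true
    else canFindA_loop A K required s2.1 s2.2.1 s2.2.2 (r + 1)
  else false
termination_by A.length - r

def can_find_subset (A : List Int) (K : Int) : Bool :=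
  if K > (A.length : Int) then false
  else canFindA_loop A K (PySem.Set.ofList (PySem.List.pyRange 1 (K + 1)))
         PySem.Dict.empty PySem.Set.empty 0 0

-- ===== PORT B =====
-- B's `for r, v in enumerate(A)` loop, state (last, L); `last[v]` has 0 ≤ v ≤ K <
-- len(last) = K+1 (the loop runs only with 0 ≤ K), so the index is always in range.
def canFindB_loop (A : List Int) (K : Int) (last : List Int) (L : Int) (r : Nat) : Bool :=
  if hr : r < A.length then
    let v := A[r]
    let L1 := if 1 ≤ v ∧ v ≤ K then
        (if L ≤ last.getD v.toNat 0 then last.getD v.toNat 0 + 1 else L)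
      else (r : Int) + 1
    let last1 := if 1 ≤ v ∧ v ≤ K then last.set v.toNat (r : Int) else last
    if K ≤ (r : Int) - L1 + 1 then true
    else canFindB_loop A K last1 L1 (r + 1)
  else false
termination_by A.length - r

def can_find_subset_alt (A : List Int) (K : Int) : Bool :=
  if K < 0 ∨ (A.length : Int) < K then false
  else canFindB_loop A K (List.replicate (K + 1).toNat (-1)) 0 0

-- ===== PRECONDITION & SPEC =====
def Spec_can_find_subset (A : List Int) (K : Int) (out : Bool) : Prop := out = can_find_subset_alt A K
instance (A : List Int) (K : Int) (out : Bool) : Decidable (Spec_can_find_subset A K out) := by unfold Spec_can_find_subset; infer_instance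

-- ===== CLAIM (what is proved, stated in full; the proofs are below) =====
def Claim_equal_can_find_subset : Prop := ∀ (A : List Int) (K : Int), Dom_can_find_subset A K → Spec_can_find_subset A K (can_find_subset A K)

-- ===== LEMMAS AND PROOFS =====

-- the contiguous segment A[l:r]
def seg (A : List Int) (l r : Nat) : List Int := (A.take r).drop l

-- "a valid window": duplicate-free and all elements in 1..K
def Ok (K : Int) (w : List Int) : Prop := w.Nodup ∧ ∀ v ∈ w, 1 ≤ v ∧ v ≤ K

-- the size-K window ending at index r is valid
def Good (A : List Int) (K : Int) (r : Nat) : Prop :=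
  K ≤ (r : Int) + 1 ∧ Ok K (seg A (r + 1 - K.toNat) (r + 1))

lemma seg_nil (A : List Int) (l r : Nat) (h : r ≤ l) : seg A l r = [] := by
  apply List.drop_eq_nil_of_le
  rw [List.length_take]
  omega

lemma seg_snoc (A : List Int) (l r : Nat) (hl : l ≤ r) (hr : r < A.length) :
    seg A l (r + 1) = seg A l r ++ [A[r]] := by
  unfold seg
  rw [List.take_add_one, List.getElem?_eq_getElem hr]
  simp only [Option.toList_some]
  rw [List.drop_append_of_le_length (by rw [List.length_take]; omega)]

lemma seg_cons (A : List Int) (l r : Nat) (hl : l < r) (hr : r ≤ A.length) :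
    seg A l r = A.getD l 0 :: seg A (l + 1) r := by
  unfold seg
  have hlt : l < (A.take r).length := by rw [List.length_take]; omega
  rw [List.drop_eq_getElem_cons hlt]
  have hh : (A.take r)[l] = A.getD l 0 := by
    rw [List.getElem_take, List.getD_eq_getElem?_getD, List.getElem?_eq_getElem (by omega),
      Option.getD_some]
  rw [hh]

lemma seg_drop (A : List Int) (l k r : Nat) : (seg A l r).drop k = seg A (l + k) r := by
  unfold seg
  rw [List.drop_drop]

lemma Ok_sublist (K : Int) (w1 w2 : List Int) (h : w1.Sublist w2) (h2 : Ok K w2) : Ok K w1 :=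
  ⟨h2.1.sublist h, fun v hv => h2.2 v (h.subset hv)⟩

lemma Ok_snoc (K : Int) (w : List Int) (x : Int) (hw : Ok K w) (hx : 1 ≤ x ∧ x ≤ K)
    (hnx : x ∉ w) : Ok K (w ++ [x]) := by
  constructor
  · simp only [List.nodup_append, List.nodup_cons, List.not_mem_nil, not_false_iff,
      List.nodup_nil, and_true]
    refine ⟨hw.1, ?_⟩
    constructor
    · trivial
    · intro a ha b hb h
      rw [List.mem_singleton] at hb
      rw [hb] at h
      rw [h] at ha
      exact hnx ha
  · intro v hv
    rcases List.mem_append.mp hv with h | h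
    · exact hw.2 v h
    · simp at h; omega

lemma mem_seg_iff (A : List Int) (l r : Nat) (hr : r ≤ A.length) (v : Int) :
    v ∈ seg A l r ↔ ∃ i : Nat, l ≤ i ∧ i < r ∧ A.getD i 0 = v := by
  unfold seg
  rw [List.mem_iff_getElem]
  constructor
  · rintro ⟨j, hj, hget⟩
    rw [List.length_drop, List.length_take] at hj
    refine ⟨l + j, by omega, by omega, ?_⟩
    rw [List.getElem_drop, List.getElem_take] at hget
    rw [List.getD_eq_getElem?_getD, List.getElem?_eq_getElem (by omega)]
    exact hget
  · rintro ⟨i, hli, hir, hget⟩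
    refine ⟨i - l, by rw [List.length_drop, List.length_take]; omega, ?_⟩
    rw [List.getElem_drop, List.getElem_take]
    rw [List.getD_eq_getElem?_getD, List.getElem?_eq_getElem (by omega)] at hget
    simpa [Nat.add_sub_cancel' hli] using hget

-- pigeonhole: a length-K window contains every value of 1..K iff it is duplicate-free in-range
lemma sum_count_toFinset (w : List Int) : ∑ a ∈ w.toFinset, w.count a = w.length := by
  simp

lemma sum_count_le (w : List Int) (S : Finset Int) : ∑ v ∈ S, w.count v ≤ w.length := by
  have h1 : ∑ v ∈ S ∩ w.toFinset, w.count v = ∑ v ∈ S, w.count v := by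
    apply Finset.sum_subset Finset.inter_subset_left
    intro x hx hnx
    apply List.count_eq_zero.mpr
    intro hxw
    exact hnx (Finset.mem_inter.mpr ⟨hx, List.mem_toFinset.mpr hxw⟩)
  calc ∑ v ∈ S, w.count v = ∑ v ∈ S ∩ w.toFinset, w.count v := h1.symm
    _ ≤ ∑ v ∈ w.toFinset, w.count v :=
        Finset.sum_le_sum_of_subset Finset.inter_subset_right
    _ = w.length := sum_count_toFinset w

lemma coverage_iff (K : Int) (hK0 : 0 ≤ K) (w : List Int) (hlen : w.length = K.toNat) :
    (∀ v : Int, 1 ≤ v → v ≤ K → 1 ≤ w.count v) ↔ Ok K w := by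
  have hcard : (Finset.Icc (1 : Int) K).card = K.toNat := by
    rw [Int.card_Icc]
    omega
  constructor
  · intro h
    have hsub : Finset.Icc (1 : Int) K ⊆ w.toFinset := by
      intro v hv
      rw [Finset.mem_Icc] at hv
      exact List.mem_toFinset.mpr (List.count_pos_iff.mp (h v hv.1 hv.2))
    have hsub2 : w.toFinset ⊆ Finset.Icc (1 : Int) K := by
      by_contra hns
      obtain ⟨a, haw, hna⟩ := Finset.not_subset.mp hns
      have hins : insert a (Finset.Icc (1 : Int) K) ⊆ w.toFinset := by
        intro x hx
        rcases Finset.mem_insert.mp hx with hx | hx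
        · exact hx ▸ haw
        · exact hsub hx
      have hpos : 1 ≤ w.count a := List.count_pos_iff.mpr (List.mem_toFinset.mp haw)
      have hge : K.toNat + 1 ≤ ∑ v ∈ insert a (Finset.Icc (1 : Int) K), w.count v := by
        rw [Finset.sum_insert (fun hmem => hna hmem)]
        have : (Finset.Icc (1 : Int) K).card ≤ ∑ v ∈ Finset.Icc (1 : Int) K, w.count v := by
          rw [Finset.card_eq_sum_ones]
          apply Finset.sum_le_sum
          intro v hv
          rw [Finset.mem_Icc] at hv
          exact h v hv.1 hv.2
        omega
      have hle := sum_count_le w (insert a (Finset.Icc (1 : Int) K))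
      omega
    have hfe : w.toFinset = Finset.Icc (1 : Int) K := subset_antisymm hsub2 hsub
    have hnd : w.Nodup := by
      have hdl : w.dedup.length = w.length := by
        have := List.card_toFinset w
        rw [hfe, hcard] at this
        omega
      exact List.dedup_eq_self.mp ((List.dedup_sublist w).eq_of_length hdl)
    refine ⟨hnd, fun v hv => ?_⟩
    have : v ∈ w.toFinset := List.mem_toFinset.mpr hv
    rw [hfe, Finset.mem_Icc] at this
    exact this
  · rintro ⟨nd, hin⟩ v h1 h2
    have hsub : w.toFinset ⊆ Finset.Icc (1 : Int) K := by
      intro a ha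
      exact Finset.mem_Icc.mpr (hin a (List.mem_toFinset.mp ha))
    have hc : w.toFinset.card = w.length := by
      rw [List.card_toFinset, nd.dedup]
    have hfe : Finset.Icc (1 : Int) K = w.toFinset :=
      (Finset.eq_of_subset_of_card_le hsub (by omega)).symm
    apply List.count_pos_iff.mpr
    apply List.mem_toFinset.mp
    rw [← hfe, Finset.mem_Icc]
    exact ⟨h1, h2⟩

lemma count_append_one (xs : List Int) (a v : Int) :
    (xs ++ [a]).count v = xs.count v + (if a = v then 1 else 0) := by
  rw [List.count_append, List.count_singleton]
  simp [beq_iff_eq]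

-- Python's found_cards == required_cards, under the found invariant, says every v ∈ 1..K is present.
lemma equal_required_iff (K : Int) (found : PySem.Set Int) (count : PySem.Dict Int Int)
    (hfound : ∀ v : Int, v ∈ found ↔ 1 ≤ v ∧ v ≤ K ∧ 1 ≤ count.getD v 0) :
    PySem.Set.equal found (PySem.Set.ofList (PySem.List.pyRange 1 (K + 1))) = true
      ↔ ∀ v : Int, 1 ≤ v → v ≤ K → 1 ≤ count.getD v 0 := by
  unfold PySem.Set.equal
  rw [Bool.and_eq_true, PySem.Set.issubset_iff, PySem.Set.issubset_iff]
  constructor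
  · intro h v h1 hK
    have hv : v ∈ found := by
      apply h.2
      rw [PySem.Set.mem_ofList, PySem.List.mem_pyRange_one]
      omega
    exact ((hfound v).mp hv).2.2
  · intro h
    constructor
    · intro x hx
      rcases (hfound x).mp hx with ⟨h1, h2, _⟩
      rw [PySem.Set.mem_ofList, PySem.List.mem_pyRange_one]
      omega
    · intro x hx
      rw [PySem.Set.mem_ofList, PySem.List.mem_pyRange_one] at hx
      exact (hfound x).mpr ⟨by omega, by omega, h x (by omega) (by omega)⟩

lemma aLoop_neg (A : List Int) (K : Int) (required : PySem.Set Int) (hK : K < 0) :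
    ∀ (fuel r : Nat) (count : PySem.Dict Int Int) (found : PySem.Set Int) (l : Int),
      A.length ≤ r + fuel → 0 ≤ l → l ≤ (r : Int) →
      canFindA_loop A K required count found l r = false := by
  intro fuel
  induction fuel with
  | zero =>
    intro r count found l hle h0 hlr
    rw [canFindA_loop, dif_neg (by omega)]
  | succ n ih =>
    intro r count found l hle h0 hlr
    by_cases hr : r < A.length
    · rw [canFindA_loop, dif_pos hr]
      have h1 : ¬(1 ≤ A[r] ∧ A[r] ≤ K) := by omega
      have h2 : (r : Int) - l + 1 > K := by omega
      have h3 : ¬(1 ≤ PySem.List.pyGetD A l 0 ∧ PySem.List.pyGetD A l 0 ≤ K) := by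
        rintro ⟨ha, hb⟩; omega
      simp only [if_pos h2, if_neg h1, if_neg h3]
      rw [if_neg (by rintro ⟨hc, -⟩; omega)]
      exact ih (r + 1) count found (l + 1) (by omega) (by omega) (by push_cast; omega)
    · rw [canFindA_loop, dif_neg hr]

-- proof-side names for A's two phases and the iteration tail (definitionally the port's body)
def aStep1 (K : Int) (count : PySem.Dict Int Int) (found : PySem.Set Int) (ar : Int) :
    PySem.Dict Int Int × PySem.Set Int :=
  if 1 ≤ ar ∧ ar ≤ K then (count.insert ar (count.getD ar 0 + 1), found.add ar)
  else (count, found)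

def aStep2 (A : List Int) (K : Int) (count1 : PySem.Dict Int Int) (found1 : PySem.Set Int)
    (l : Int) (r : Nat) : PySem.Dict Int Int × PySem.Set Int × Int :=
  if (r : Int) - l + 1 > K then
    let al := PySem.List.pyGetD A l 0
    if 1 ≤ al ∧ al ≤ K then
      (count1.insert al (count1.getD al 0 - 1),
       (if count1.getD al 0 - 1 = 0 then PySem.Set.discard found1 al else found1), l + 1)
    else (count1, found1, l + 1)
  else (count1, found1, l)

def aTail (A : List Int) (K : Int) (required : PySem.Set Int)
    (s2 : PySem.Dict Int Int × PySem.Set Int × Int) (r : Nat) : Bool :=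
  if ((r : Int) - s2.2.2 + 1 = K) ∧ PySem.Set.equal s2.2.1 required = true then true
  else canFindA_loop A K required s2.1 s2.2.1 s2.2.2 (r + 1)

-- phase 1 (add A[r]) keeps the count/found invariants, window growing by ar
lemma step1_inv (K : Int) (ar : Int) (count : PySem.Dict Int Int) (found : PySem.Set Int)
    (w : List Int)
    (hA : ∀ v : Int, 1 ≤ v → v ≤ K → count.getD v 0 = (w.count v : Int))
    (hF : ∀ v : Int, v ∈ found ↔ 1 ≤ v ∧ v ≤ K ∧ 1 ≤ count.getD v 0) :
    (∀ v : Int, 1 ≤ v → v ≤ K →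
      (aStep1 K count found ar).1.getD v 0 = ((w ++ [ar]).count v : Int)) ∧
    (∀ v : Int, v ∈ (aStep1 K count found ar).2 ↔
      1 ≤ v ∧ v ≤ K ∧ 1 ≤ (aStep1 K count found ar).1.getD v 0) := by
  unfold aStep1
  by_cases hv : 1 ≤ ar ∧ ar ≤ K
  · simp only [if_pos hv]
    refine ⟨?_, ?_⟩
    · intro v h1 h2
      rw [count_append_one]
      by_cases hvar : v = ar
      · subst hvar
        rw [PySem.Dict.getD_insert_self, hA v h1 h2, if_pos rfl]
        push_cast
        omega
      · rw [PySem.Dict.getD_insert_of_ne _ _ _ hvar, hA v h1 h2, if_neg (by omega)]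
        push_cast
        omega
    · intro v
      rw [PySem.Set.mem_add]
      by_cases hvar : v = ar
      · subst hvar
        rw [PySem.Dict.getD_insert_self]
        constructor
        · intro _
          have hnn := hA v hv.1 hv.2
          refine ⟨hv.1, hv.2, by omega⟩
        · intro _
          right
          rfl
      · rw [PySem.Dict.getD_insert_of_ne _ _ _ hvar]
        constructor
        · rintro (hm | h)
          · exact (hF v).mp hm
          · exact absurd h hvar
        · intro h
          left
          exact (hF v).mpr h
  · simp only [if_neg hv]
    refine ⟨?_, hF⟩
    intro v h1 h2
    rw [count_append_one, if_neg (by omega), hA v h1 h2]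
    push_cast
    omega

-- phase 2 (drop A[l] when the window is too long) keeps the invariants, window sliding
lemma step2_inv (A : List Int) (K : Int) (hK0 : 0 ≤ K) (r : Nat) (hr : r < A.length)
    (count1 : PySem.Dict Int Int) (found1 : PySem.Set Int)
    (hA1 : ∀ v : Int, 1 ≤ v → v ≤ K →
      count1.getD v 0 = ((seg A (r - K.toNat) (r + 1)).count v : Int))
    (hF1 : ∀ v : Int, v ∈ found1 ↔ 1 ≤ v ∧ v ≤ K ∧ 1 ≤ count1.getD v 0) :
    (∀ v : Int, 1 ≤ v → v ≤ K →
      (aStep2 A K count1 found1 (max 0 ((r : Int) - K)) r).1.getD v 0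
        = ((seg A (r + 1 - K.toNat) (r + 1)).count v : Int)) ∧
    (∀ v : Int, v ∈ (aStep2 A K count1 found1 (max 0 ((r : Int) - K)) r).2.1 ↔
      1 ≤ v ∧ v ≤ K ∧ 1 ≤ (aStep2 A K count1 found1 (max 0 ((r : Int) - K)) r).1.getD v 0) ∧
    (aStep2 A K count1 found1 (max 0 ((r : Int) - K)) r).2.2 = max 0 ((r : Int) + 1 - K) := by
  unfold aStep2
  by_cases hKr : K ≤ (r : Int)
  · have hmax : max 0 ((r : Int) - K) = (r : Int) - K := by omega
    rw [hmax, if_pos (show (r : Int) - ((r : Int) - K) + 1 > K by omega)]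
    rw [PySem.List.pyGetD_of_nonneg A 0 (by omega)]
    have hidx : ((r : Int) - K).toNat = r - K.toNat := by omega
    rw [hidx]
    set j := r - K.toNat with hj
    have hseg : seg A j (r + 1) = A.getD j 0 :: seg A (j + 1) (r + 1) :=
      seg_cons A j (r + 1) (by omega) (by omega)
    have hj1 : j + 1 = r + 1 - K.toNat := by omega
    set al := A.getD j 0 with hal
    have hcnt : ∀ v : Int, (seg A j (r + 1)).count v
        = (seg A (r + 1 - K.toNat) (r + 1)).count v + (if al = v then 1 else 0) := by
      intro v
      rw [hseg, ← hj1, List.count_cons]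
      simp [beq_iff_eq]
    by_cases huv : 1 ≤ al ∧ al ≤ K
    · rw [if_pos huv]
      dsimp only
      have hpos : 1 ≤ count1.getD al 0 := by
        rw [hA1 al huv.1 huv.2, hcnt al, if_pos rfl]
        push_cast
        omega
      refine ⟨?_, ?_, by omega⟩
      · intro v h1 h2
        by_cases hvu : v = al
        · subst hvu
          rw [PySem.Dict.getD_insert_self, hA1 al huv.1 huv.2, hcnt al, if_pos rfl]
          push_cast
          omega
        · rw [PySem.Dict.getD_insert_of_ne _ _ _ hvu, hA1 v h1 h2, hcnt v, if_neg (by omega)]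
          push_cast
          omega
      · intro v
        by_cases hc0 : count1.getD al 0 - 1 = 0
        · rw [if_pos hc0, PySem.Set.mem_discard]
          by_cases hvu : v = al
          · subst hvu
            rw [PySem.Dict.getD_insert_self]
            constructor
            · rintro ⟨-, hne⟩
              exact absurd rfl hne
            · rintro ⟨-, -, hge⟩
              omega
          · rw [PySem.Dict.getD_insert_of_ne _ _ _ hvu]
            constructor
            · rintro ⟨hm, -⟩
              exact (hF1 v).mp hm
            · intro h
              exact ⟨(hF1 v).mpr h, hvu⟩
        · rw [if_neg hc0]
          by_cases hvu : v = al
          · subst hvu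
            rw [PySem.Dict.getD_insert_self]
            constructor
            · intro _
              exact ⟨huv.1, huv.2, by omega⟩
            · intro _
              exact (hF1 al).mpr ⟨huv.1, huv.2, hpos⟩
          · rw [PySem.Dict.getD_insert_of_ne _ _ _ hvu]
            exact hF1 v
    · rw [if_neg huv]
      dsimp only
      refine ⟨?_, hF1, by omega⟩
      intro v h1 h2
      rw [hA1 v h1 h2, hcnt v, if_neg (by omega)]
      push_cast
      omega
  · have hmax : max 0 ((r : Int) - K) = 0 := by omega
    rw [hmax, if_neg (show ¬((r : Int) - 0 + 1 > K) by omega)]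
    dsimp only
    have hseg : seg A (r + 1 - K.toNat) (r + 1) = seg A (r - K.toNat) (r + 1) := by
      have h1 : r + 1 - K.toNat = 0 := by omega
      have h2 : r - K.toNat = 0 := by omega
      rw [h1, h2]
    refine ⟨?_, hF1, by omega⟩
    intro v h1 h2
    rw [hseg]
    exact hA1 v h1 h2

-- A's loop from index r returns true iff some later size-K window is valid
lemma loopA_iff (A : List Int) (K : Int) (hK0 : 0 ≤ K) :
    ∀ (fuel r : Nat) (count : PySem.Dict Int Int) (found : PySem.Set Int),
      A.length ≤ r + fuel →
      (∀ v : Int, 1 ≤ v → v ≤ K → count.getD v 0 = ((seg A (r - K.toNat) r).count v : Int)) →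
      (∀ v : Int, v ∈ found ↔ 1 ≤ v ∧ v ≤ K ∧ 1 ≤ count.getD v 0) →
      (canFindA_loop A K (PySem.Set.ofList (PySem.List.pyRange 1 (K + 1))) count found
          (max 0 ((r : Int) - K)) r = true
        ↔ ∃ r' : Nat, r ≤ r' ∧ r' < A.length ∧ Good A K r') := by
  intro fuel
  induction fuel with
  | zero =>
    intro r count found hle hA hF
    rw [canFindA_loop, dif_neg (by omega)]
    constructor
    · intro h
      exact absurd h (by simp)
    · rintro ⟨r', h1, h2, -⟩
      omega
  | succ n ih =>
    intro r count found hle hA hF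
    by_cases hr : r < A.length
    case neg =>
      rw [canFindA_loop, dif_neg hr]
      constructor
      · intro h
        exact absurd h (by simp)
      · rintro ⟨r', h1, h2, -⟩
        omega
    case pos =>
      have hunf : canFindA_loop A K (PySem.Set.ofList (PySem.List.pyRange 1 (K + 1)))
            count found (max 0 ((r : Int) - K)) r
          = aTail A K (PySem.Set.ofList (PySem.List.pyRange 1 (K + 1)))
              (aStep2 A K (aStep1 K count found A[r]).1 (aStep1 K count found A[r]).2
                (max 0 ((r : Int) - K)) r) r := by
        rw [canFindA_loop, dif_pos hr]
        rfl
      rw [hunf]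
      have hw : seg A (r - K.toNat) (r + 1) = seg A (r - K.toNat) r ++ [A[r]] :=
        seg_snoc A _ r (by omega) hr
      obtain ⟨hA1, hF1⟩ := step1_inv K (A[r]) count found (seg A (r - K.toNat) r) hA hF
      rw [← hw] at hA1
      obtain ⟨hA2, hF2, hl2⟩ := step2_inv A K hK0 r hr _ _ hA1 hF1
      unfold aTail
      rw [hl2]
      have hcast : (((r + 1 : Nat)) : Int) = (r : Int) + 1 := by push_cast; ring
      have ih' := ih (r + 1) _ _ (by omega) hA2 hF2
      rw [hcast] at ih'
      have hsplit : (∃ r' : Nat, r ≤ r' ∧ r' < A.length ∧ Good A K r')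
          ↔ Good A K r ∨ (∃ r' : Nat, r + 1 ≤ r' ∧ r' < A.length ∧ Good A K r') := by
        constructor
        · rintro ⟨r', h1, h2, h3⟩
          rcases Nat.eq_or_lt_of_le h1 with h | h
          · exact Or.inl (h ▸ h3)
          · exact Or.inr ⟨r', by omega, h2, h3⟩
        · rintro (h | ⟨r', h1, h2, h3⟩)
          · exact ⟨r, le_rfl, hr, h⟩
          · exact ⟨r', by omega, h2, h3⟩
      rw [hsplit]
      by_cases hKr1 : K ≤ (r : Int) + 1
      case neg =>
        have hmax2 : max 0 ((r : Int) + 1 - K) = 0 := by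
          clear hl2 ih' hsplit
          omega
        rw [if_neg (by
          rintro ⟨h1, -⟩
          rw [hmax2] at h1
          omega)]
        rw [ih']
        have hng : ¬ Good A K r := fun hg => hKr1 hg.1
        exact (or_iff_right hng).symm
      case pos =>
        have hmax2 : max 0 ((r : Int) + 1 - K) = (r : Int) + 1 - K := by
          clear hl2 ih' hsplit
          omega
        rw [hmax2]
        rw [hmax2] at ih' 
        have hfirst : ((r : Int) - ((r : Int) + 1 - K) + 1 = K) := by omega
        have hlen : (seg A (r + 1 - K.toNat) (r + 1)).length = K.toNat := by
          unfold seg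
          rw [List.length_drop, List.length_take]
          omega
        have hcov := coverage_iff K hK0 _ hlen
        have hreq := equal_required_iff K _ _ hF2
        have hGood : Good A K r ↔ Ok K (seg A (r + 1 - K.toNat) (r + 1)) := by
          unfold Good
          exact and_iff_right hKr1
        by_cases hok : Ok K (seg A (r + 1 - K.toNat) (r + 1))
        · rw [if_pos ⟨hfirst, hreq.mpr (by
            intro v h1 h2
            rw [hA2 v h1 h2]
            have := hcov.mpr hok v h1 h2
            omega)⟩]
          constructor
          · intro _
            exact Or.inl (hGood.mpr hok)
          · intro _
            rfl
        · rw [if_neg (by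
            rintro ⟨-, heq⟩
            apply hok
            apply hcov.mp
            intro v h1 h2
            have hh := hreq.mp heq v h1 h2
            rw [hA2 v h1 h2] at hh
            omega)]
          rw [ih']
          have hng : ¬ Good A K r := fun hg => hok (hGood.mp hg)
          exact (or_iff_right hng).symm

-- B's loop invariant: A[L..r) is a valid window, L is minimal such, and last is the
-- last-occurrence table for values 1..K over A[0..r)
def BInv (A : List Int) (K : Int) (last : List Int) (L : Int) (r : Nat) : Prop :=
  0 ≤ L ∧ L ≤ (r : Int) ∧ last.length = (K + 1).toNat ∧
  Ok K (seg A L.toNat r) ∧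
  (L = 0 ∨ ¬ Ok K (seg A (L.toNat - 1) r)) ∧
  (∀ v : Int, 1 ≤ v → v ≤ K →
    (∀ i : Nat, i < r → A.getD i 0 = v → (i : Int) ≤ last.getD v.toNat 0) ∧
    (last.getD v.toNat 0 = -1 ∨
      (0 ≤ last.getD v.toNat 0 ∧ last.getD v.toNat 0 < (r : Int) ∧
        A.getD (last.getD v.toNat 0).toNat 0 = v)))

-- proof-side names for B's updated L and last (definitionally the port's let-bindings)
def bL1 (K : Int) (last : List Int) (L : Int) (r : Nat) (v : Int) : Int :=
  if 1 ≤ v ∧ v ≤ K then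
    (if L ≤ last.getD v.toNat 0 then last.getD v.toNat 0 + 1 else L)
  else (r : Int) + 1

def bLast1 (K : Int) (last : List Int) (r : Nat) (v : Int) : List Int :=
  if 1 ≤ v ∧ v ≤ K then last.set v.toNat (r : Int) else last

-- one B iteration: the invariant advances and the length test is exactly Good
lemma bStep_inv (A : List Int) (K : Int) (hK0 : 0 ≤ K) (last : List Int) (L : Int) (r : Nat)
    (hr : r < A.length) (hI : BInv A K last L r) :
    BInv A K (bLast1 K last r A[r]) (bL1 K last L r A[r]) (r + 1) ∧
    ((K ≤ (r : Int) - bL1 K last L r A[r] + 1) ↔ Good A K r) := by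
  obtain ⟨hL0, hLr, hlen, hOk, hMax, hLast⟩ := hI
  have hgd : A.getD r 0 = A[r] := by
    rw [List.getD_eq_getElem?_getD, List.getElem?_eq_getElem hr, Option.getD_some]
  unfold bL1 bLast1
  by_cases hv : 1 ≤ A[r] ∧ A[r] ≤ K
  · rw [if_pos hv, if_pos hv]
    set v := A[r] with hvdef
    set j := last.getD v.toNat 0 with hjdef
    obtain ⟨hocc, hjspec⟩ := hLast v hv.1 hv.2
    have hjr : j < (r : Int) := by
      rcases hjspec with h | h
      · omega
      · exact h.2.1
    set L' := if L ≤ j then j + 1 else L with hL'def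
    have hL'0 : 0 ≤ L' := by
      rw [hL'def]
      split_ifs <;> omega
    have hL'r : L' ≤ (r : Int) := by
      rw [hL'def]
      split_ifs <;> omega
    have hjL' : j < L' := by
      rw [hL'def]
      split_ifs <;> omega
    have hLL' : L ≤ L' := by
      rw [hL'def]
      split_ifs <;> omega
    have hnotmem : v ∉ seg A L'.toNat r := by
      intro hm
      obtain ⟨i, hi1, hi2, hi3⟩ := (mem_seg_iff A L'.toNat r (by omega) v).mp hm
      have := hocc i hi2 hi3
      omega
    have hOk' : Ok K (seg A L'.toNat r) := by
      have hd : (seg A L.toNat r).drop (L'.toNat - L.toNat) = seg A L'.toNat r := by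
        rw [seg_drop]
        congr 1
        omega
      rw [← hd]
      exact Ok_sublist K _ _ (List.drop_sublist _ _) hOk
    have hsnoc : seg A L'.toNat (r + 1) = seg A L'.toNat r ++ [v] :=
      seg_snoc A L'.toNat r (by omega) hr
    have hOkw : Ok K (seg A L'.toNat (r + 1)) := by
      rw [hsnoc]
      exact Ok_snoc K _ v hOk' hv hnotmem
    have hMax' : L' = 0 ∨ ¬ Ok K (seg A (L'.toNat - 1) (r + 1)) := by
      by_cases hLj : L ≤ j
      · right
        have hj0 : 0 ≤ j := by omega
        have hL'j : L'.toNat - 1 = j.toNat := by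
          rw [hL'def, if_pos hLj]
          omega
        rw [hL'j]
        have hchead : A.getD j.toNat 0 = v := by
          rcases hjspec with h | h
          · omega
          · exact h.2.2
        have hcons : seg A j.toNat (r + 1) = v :: seg A (j.toNat + 1) (r + 1) := by
          rw [seg_cons A j.toNat (r + 1) (by omega) (by omega), hchead]
        have hmem2 : v ∈ seg A (j.toNat + 1) (r + 1) := by
          apply (mem_seg_iff A (j.toNat + 1) (r + 1) (by omega) v).mpr
          exact ⟨r, by omega, by omega, hgd⟩
        rintro ⟨nd, -⟩
        rw [hcons] at nd
        exact (List.nodup_cons.mp nd).1 hmem2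
      · have hL'L : L' = L := by
          rw [hL'def, if_neg hLj]
        rcases hMax with h0 | hno
        · exact Or.inl (hL'L.trans h0)
        · right
          rw [hL'L]
          have hsnoc2 : seg A (L.toNat - 1) (r + 1) = seg A (L.toNat - 1) r ++ [v] :=
            seg_snoc A (L.toNat - 1) r (by omega) hr
          rw [hsnoc2]
          intro hOk2
          exact hno (Ok_sublist K _ _ (List.sublist_append_left _ _) hOk2)
    have hLast' : ∀ v' : Int, 1 ≤ v' → v' ≤ K →
        (∀ i : Nat, i < r + 1 → A.getD i 0 = v' →
          (i : Int) ≤ (last.set v.toNat (r : Int)).getD v'.toNat 0) ∧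
        ((last.set v.toNat (r : Int)).getD v'.toNat 0 = -1 ∨
          (0 ≤ (last.set v.toNat (r : Int)).getD v'.toNat 0 ∧
            (last.set v.toNat (r : Int)).getD v'.toNat 0 < ((r + 1 : Nat) : Int) ∧
            A.getD ((last.set v.toNat (r : Int)).getD v'.toNat 0).toNat 0 = v')) := by
      intro v' h1 h2
      by_cases hvv : v' = v
      · subst hvv
        have hlt : v.toNat < last.length := by omega
        rw [List.getD_eq_getElem?_getD, List.getElem?_set_self hlt, Option.getD_some]
        refine ⟨fun i hi _ => by omega, Or.inr ⟨by omega, by push_cast; omega, ?_⟩⟩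
        have : ((r : Nat) : Int).toNat = r := by omega
        rw [this]
        exact hgd
      · have hne : v.toNat ≠ v'.toNat := by omega
        rw [List.getD_eq_getElem?_getD, List.getElem?_set_ne hne, ← List.getD_eq_getElem?_getD]
        obtain ⟨hocc', hspec'⟩ := hLast v' h1 h2
        refine ⟨?_, ?_⟩
        · intro i hi hiv
          rcases Nat.lt_or_ge i r with h | h
          · exact hocc' i h hiv
          · have : i = r := by omega
            subst this
            rw [hgd] at hiv
            exact absurd hiv.symm hvv
        · rcases hspec' with h | h
          · exact Or.inl h
          · exact Or.inr ⟨h.1, by push_cast; omega, h.2.2⟩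
    have hIv : BInv A K (last.set v.toNat (r : Int)) L' (r + 1) := by
      refine ⟨hL'0, by push_cast; omega, by rw [List.length_set]; exact hlen, hOkw, hMax', hLast'⟩
    refine ⟨hIv, ?_⟩
    constructor
    · intro h
      have hK1 : K ≤ (r : Int) + 1 := by omega
      refine ⟨hK1, ?_⟩
      have hd : (seg A L'.toNat (r + 1)).drop ((r + 1 - K.toNat) - L'.toNat)
          = seg A (r + 1 - K.toNat) (r + 1) := by
        rw [seg_drop]
        congr 1
        omega
      rw [← hd]
      exact Ok_sublist K _ _ (List.drop_sublist _ _) hOkw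
    · rintro ⟨hgK, hgOk⟩
      by_contra hnc
      have hL'1 : 1 ≤ L' := by omega
      rcases hMax' with h0 | hno
      · omega
      · apply hno
        have hd : (seg A (r + 1 - K.toNat) (r + 1)).drop ((L'.toNat - 1) - (r + 1 - K.toNat))
            = seg A (L'.toNat - 1) (r + 1) := by
          rw [seg_drop]
          congr 1
          omega
        rw [← hd]
        exact Ok_sublist K _ _ (List.drop_sublist _ _) hgOk
  · rw [if_neg hv, if_neg hv]
    have hnil : seg A (((r : Int) + 1).toNat) (r + 1) = [] := by
      apply seg_nil
      omega
    have hIv : BInv A K last ((r : Int) + 1) (r + 1) := by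
      refine ⟨by omega, by push_cast; omega, hlen, ?_, ?_, ?_⟩
      · rw [hnil]
        exact ⟨List.nodup_nil, by simp⟩
      · right
        have hidx : ((r : Int) + 1).toNat - 1 = r := by omega
        rw [hidx]
        have hcons : seg A r (r + 1) = A.getD r 0 :: seg A (r + 1) (r + 1) :=
          seg_cons A r (r + 1) (by omega) (by omega)
        rw [hcons, seg_nil A (r + 1) (r + 1) le_rfl, hgd]
        rintro ⟨-, hin⟩
        exact hv (hin A[r] (List.mem_singleton_self _))
      · intro v' h1 h2
        obtain ⟨hocc', hspec'⟩ := hLast v' h1 h2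
        refine ⟨?_, ?_⟩
        · intro i hi hiv
          rcases Nat.lt_or_ge i r with h | h
          · exact hocc' i h hiv
          · have hir : i = r := by omega
            rw [hir, hgd] at hiv
            exact absurd (show 1 ≤ A[r] ∧ A[r] ≤ K by rw [hiv]; exact ⟨h1, h2⟩) hv
        · rcases hspec' with h | h
          · exact Or.inl h
          · exact Or.inr ⟨h.1, by push_cast; omega, h.2.2⟩
    refine ⟨hIv, ?_⟩
    constructor
    · intro h
      have hK00 : K = 0 := by omega
      subst hK00
      refine ⟨by omega, ?_⟩
      have : r + 1 - (0 : Int).toNat = r + 1 := by omega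
      rw [this, seg_nil A (r + 1) (r + 1) le_rfl]
      exact ⟨List.nodup_nil, by simp⟩
    · rintro ⟨hgK, hgOk⟩
      by_contra hnc
      have hK1 : 1 ≤ K := by omega
      have hmem : A[r] ∈ seg A (r + 1 - K.toNat) (r + 1) := by
        apply (mem_seg_iff A (r + 1 - K.toNat) (r + 1) (by omega) A[r]).mpr
        exact ⟨r, by omega, by omega, hgd⟩
      exact hv (hgOk.2 A[r] hmem)

-- B's loop from index r returns true iff some later size-K window is valid
lemma loopB_iff (A : List Int) (K : Int) (hK0 : 0 ≤ K) :
    ∀ (fuel r : Nat) (last : List Int) (L : Int),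
      A.length ≤ r + fuel → BInv A K last L r →
      (canFindB_loop A K last L r = true
        ↔ ∃ r' : Nat, r ≤ r' ∧ r' < A.length ∧ Good A K r') := by
  intro fuel
  induction fuel with
  | zero =>
    intro r last L hle hI
    rw [canFindB_loop, dif_neg (by omega)]
    constructor
    · intro h
      exact absurd h (by simp)
    · rintro ⟨r', h1, h2, -⟩
      omega
  | succ n ih =>
    intro r last L hle hI
    by_cases hr : r < A.length
    case neg =>
      rw [canFindB_loop, dif_neg hr]
      constructor
      · intro h
        exact absurd h (by simp)
      · rintro ⟨r', h1, h2, -⟩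
        omega
    case pos =>
      have hunf : canFindB_loop A K last L r
          = (if K ≤ (r : Int) - bL1 K last L r A[r] + 1 then true
             else canFindB_loop A K (bLast1 K last r A[r]) (bL1 K last L r A[r]) (r + 1)) := by
        rw [canFindB_loop, dif_pos hr]
        rfl
      rw [hunf]
      obtain ⟨hIv, hcond⟩ := bStep_inv A K hK0 last L r hr hI
      have hsplit : (∃ r' : Nat, r ≤ r' ∧ r' < A.length ∧ Good A K r')
          ↔ Good A K r ∨ (∃ r' : Nat, r + 1 ≤ r' ∧ r' < A.length ∧ Good A K r') := by
        constructor
        · rintro ⟨r', h1, h2, h3⟩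
          rcases Nat.eq_or_lt_of_le h1 with h | h
          · exact Or.inl (h ▸ h3)
          · exact Or.inr ⟨r', by omega, h2, h3⟩
        · rintro (h | ⟨r', h1, h2, h3⟩)
          · exact ⟨r, le_rfl, hr, h⟩
          · exact ⟨r', by omega, h2, h3⟩
      rw [hsplit]
      by_cases hg : Good A K r
      · rw [if_pos (hcond.mpr hg)]
        constructor
        · intro _
          exact Or.inl hg
        · intro _
          rfl
      · rw [if_neg (fun h => hg (hcond.mp h))]
        rw [ih (r + 1) _ _ (by omega) hIv]
        exact (or_iff_right hg).symm

-- ===== VERDICT (by name: the statement is the Claim_ definition above) =====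
theorem can_find_subset_spec : Claim_equal_can_find_subset := by
  intro A K _
  unfold Spec_can_find_subset can_find_subset can_find_subset_alt
  by_cases hbig : K > (A.length : Int)
  · rw [if_pos hbig, if_pos (Or.inr hbig)]
  · by_cases hneg : K < 0
    · rw [if_neg hbig, if_pos (Or.inl hneg)]
      exact aLoop_neg A K _ hneg A.length 0 _ _ 0 (by omega) le_rfl (by omega)
    · rw [if_neg hbig, if_neg (by omega)]
      have hA0 : ∀ v : Int, 1 ≤ v → v ≤ K →
          (PySem.Dict.empty : PySem.Dict Int Int).getD v 0 = ((seg A (0 - K.toNat) 0).count v : Int) := by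
        intro v _ _
        have he : (PySem.Dict.empty : PySem.Dict Int Int).getD v 0 = 0 := rfl
        rw [he]
        simp [seg]
      have hF0 : ∀ v : Int, v ∈ (PySem.Set.empty : PySem.Set Int) ↔
          1 ≤ v ∧ v ≤ K ∧ 1 ≤ (PySem.Dict.empty : PySem.Dict Int Int).getD v 0 := by
        intro v
        have he : (PySem.Dict.empty : PySem.Dict Int Int).getD v 0 = 0 := rfl
        rw [he]
        simp [PySem.Set.empty]
      have hI0 : BInv A K (List.replicate (K + 1).toNat (-1)) 0 0 := by
        refine ⟨le_rfl, by omega, by simp, ?_, Or.inl rfl, ?_⟩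
        · constructor
          · simp [seg]
          · intro v hv; simp [seg] at hv
        · intro v h1 h2
          have hv : v.toNat < (K + 1).toNat := by omega
          rw [List.getD_replicate _ hv]
          exact ⟨fun i hi => by omega, Or.inl rfl⟩
      have hAiff := loopA_iff A K (by omega) A.length 0
        PySem.Dict.empty PySem.Set.empty (by omega) hA0 hF0
      have hBiff := loopB_iff A K (by omega) A.length 0
        (List.replicate (K + 1).toNat (-1)) 0 (by omega) hI0
      have hmax : max 0 (((0 : Nat) : Int) - K) = 0 := by omega
      rw [hmax] at hAiff
      rw [Bool.eq_iff_iff, hAiff, hBiff]
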